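-- pv_equiv track=rewrite | github.com/jon-heard/MagicaVoxel---Object-merger | objectMerger.py | fixMagicalVoxelBug
-- ===== SOURCE A (Python) =====
-- def addToVector(v1, v2):
--     return [ v1[0] + v2[0], v1[1] + v2[1], v1[2] + v2[2] ] + list(v2[3:])
--
-- def fixMagicalVoxelBug(rotationByte, translation):
--     rotationAdjustments = {
--         1:   [+0, +0, +0],  2: [+0, +0, +0],  4: [+0, +0, +0],  6: [+0, +0, +0],  8: [+0, +0, +0],
--         9:   [+0, +0, +0], 17: [-1, +0, +0], 18: [-1, +0, +0], 20: [-1, +0, +0], 22: [-1, +0, +0],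
--         24:  [-1, +0, +0], 25: [-1, +0, +0], 33: [+0, -1, +0], 34: [+0, -1, +0], 36: [+0, -1, +0],
--         38:  [+0, -1, +0], 40: [+0, -1, +0], 41: [+0, -1, +0], 49: [-1, -1, +0], 50: [-1, -1, +0],
--         52:  [-1, -1, +0], 54: [-1, -1, +0], 56: [-1, -1, +0], 57: [-1, -1, +0], 65: [+0, +0, -1],
--         66:  [+0, +0, -1], 68: [+0, +0, -1], 70: [+0, +0, -1], 72: [+0, +0, -1], 73: [+0, +0, -1],
--         81:  [-1, +0, -1], 82: [-1, +0, -1], 84: [-1, +0, -1], 86: [-1, +0, -1], 88: [-1, +0, -1],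
--         89:  [-1, +0, -1], 97: [+0, -1, -1], 98: [+0, -1, -1],100: [+0, -1, -1],102: [+0, -1, -1],
--         104: [+0, -1, -1],105: [+0, -1, -1],113: [-1, -1, -1],114: [-1, -1, -1],116: [-1, -1, -1],
--         118: [-1, -1, -1],120: [-1, -1, -1],121: [-1, -1, -1]
--     }
--     for i in rotationAdjustments:
--         if rotationByte == i:
--             return addToVector(rotationAdjustments[i], translation)
--     return translation
-- ===== SOURCE B (Python) =====
-- def fixMagicalVoxelBug(rotationByte, translation):
--     b = rotationByte
--     if 0 <= b < 128 and b % 16 in (1, 2, 4, 6, 8, 9):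
--         ax = -((b // 16) % 2)
--         ay = -((b // 32) % 2)
--         az = -((b // 64) % 2)
--         return [ax + translation[0], ay + translation[1], az + translation[2]] + list(translation[3:])
--     return translation
-- ===== Notes on version B (the rewrite author's own statement) =====
-- stated objective: simpler
-- what changed: The 47-key lookup table and the linear scan over its keys are replaced by bit arithmetic on the rotation byte: the adjustment is read off from bits 4-6 and validity is the closed-form test 0<=b<128 and b%16 in {1,2,4,6,8,9}.
import Mathlib
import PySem

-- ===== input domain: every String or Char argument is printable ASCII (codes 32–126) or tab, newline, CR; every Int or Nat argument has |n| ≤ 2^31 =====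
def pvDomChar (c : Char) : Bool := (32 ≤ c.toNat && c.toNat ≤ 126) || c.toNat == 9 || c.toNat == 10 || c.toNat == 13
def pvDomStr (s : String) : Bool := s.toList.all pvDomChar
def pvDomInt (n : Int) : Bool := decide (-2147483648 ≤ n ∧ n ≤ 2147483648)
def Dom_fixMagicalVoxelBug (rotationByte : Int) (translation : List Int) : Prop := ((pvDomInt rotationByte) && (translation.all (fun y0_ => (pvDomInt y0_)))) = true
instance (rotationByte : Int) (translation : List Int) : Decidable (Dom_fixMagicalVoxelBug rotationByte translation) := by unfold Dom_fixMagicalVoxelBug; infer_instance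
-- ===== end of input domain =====

-- B replaces A's 47-key table and key scan by O(1) bit arithmetic on the rotation byte (simpler).
-- Pre_ excludes inputs where Python A raises IndexError (matched rotation byte with fewer than 3 translation components).

-- ===== PORT A =====
-- v2[i] reads are pyGetD (in range under Pre_, where addToVectorA is only reached with len ≥ 3)
def addToVectorA (v1 v2 : List Int) : List Int :=
  [PySem.List.pyGetD v1 0 0 + PySem.List.pyGetD v2 0 0,
   PySem.List.pyGetD v1 1 0 + PySem.List.pyGetD v2 1 0,
   PySem.List.pyGetD v1 2 0 + PySem.List.pyGetD v2 2 0] ++ PySem.List.slice v2 (some 3) none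

def pvRotationAdjustments : List (Int × List Int) :=
  [(1,[0,0,0]),(2,[0,0,0]),(4,[0,0,0]),(6,[0,0,0]),(8,[0,0,0]),
   (9,[0,0,0]),(17,[-1,0,0]),(18,[-1,0,0]),(20,[-1,0,0]),(22,[-1,0,0]),
   (24,[-1,0,0]),(25,[-1,0,0]),(33,[0,-1,0]),(34,[0,-1,0]),(36,[0,-1,0]),
   (38,[0,-1,0]),(40,[0,-1,0]),(41,[0,-1,0]),(49,[-1,-1,0]),(50,[-1,-1,0]),
   (52,[-1,-1,0]),(54,[-1,-1,0]),(56,[-1,-1,0]),(57,[-1,-1,0]),(65,[0,0,-1]),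
   (66,[0,0,-1]),(68,[0,0,-1]),(70,[0,0,-1]),(72,[0,0,-1]),(73,[0,0,-1]),
   (81,[-1,0,-1]),(82,[-1,0,-1]),(84,[-1,0,-1]),(86,[-1,0,-1]),(88,[-1,0,-1]),
   (89,[-1,0,-1]),(97,[0,-1,-1]),(98,[0,-1,-1]),(100,[0,-1,-1]),(102,[0,-1,-1]),
   (104,[0,-1,-1]),(105,[0,-1,-1]),(113,[-1,-1,-1]),(114,[-1,-1,-1]),(116,[-1,-1,-1]),
   (118,[-1,-1,-1]),(120,[-1,-1,-1]),(121,[-1,-1,-1])]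

-- the 'for i in rotationAdjustments: if rotationByte == i: return …' loop
def pvScanA (rotationByte : Int) (translation : List Int) : List (Int × List Int) → List Int
  | [] => translation
  | (k, adj) :: rest =>
      if rotationByte = k then addToVectorA adj translation
      else pvScanA rotationByte translation rest

def fixMagicalVoxelBug (rotationByte : Int) (translation : List Int) : List Int :=
  pvScanA rotationByte translation pvRotationAdjustments

-- ===== PORT B =====
def fixMagicalVoxelBug_alt (rotationByte : Int) (translation : List Int) : List Int :=
  if 0 ≤ rotationByte ∧ rotationByte < 128 ∧
     (PySem.Int.mod rotationByte 16 = 1 ∨ PySem.Int.mod rotationByte 16 = 2 ∨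
      PySem.Int.mod rotationByte 16 = 4 ∨ PySem.Int.mod rotationByte 16 = 6 ∨
      PySem.Int.mod rotationByte 16 = 8 ∨ PySem.Int.mod rotationByte 16 = 9) then
    let ax := -(PySem.Int.mod (PySem.Int.floordiv rotationByte 16) 2)
    let ay := -(PySem.Int.mod (PySem.Int.floordiv rotationByte 32) 2)
    let az := -(PySem.Int.mod (PySem.Int.floordiv rotationByte 64) 2)
    [ax + PySem.List.pyGetD translation 0 0,
     ay + PySem.List.pyGetD translation 1 0,
     az + PySem.List.pyGetD translation 2 0] ++ PySem.List.slice translation (some 3) none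
  else translation

-- ===== PRECONDITION & SPEC =====
-- Pre_ excludes exactly the inputs where Python A raises IndexError: a rotation byte that is a
-- table key together with a translation of fewer than 3 components (Python B raises there too).
def Pre_fixMagicalVoxelBug (rotationByte : Int) (translation : List Int) : Prop :=
  rotationByte ∈ ([1,2,4,6,8,9,17,18,20,22,24,25,33,34,36,38,40,41,49,50,52,54,56,57,
                   65,66,68,70,72,73,81,82,84,86,88,89,97,98,100,102,104,105,113,114,116,118,120,121] : List Int)
  → 3 ≤ translation.length
instance (rotationByte : Int) (translation : List Int) : Decidable (Pre_fixMagicalVoxelBug rotationByte translation) := by unfold Pre_fixMagicalVoxelBug; infer_instance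

def pvWitness_fixMagicalVoxelBug : Int × List Int := (17, [3, 4, 5])

def Spec_fixMagicalVoxelBug (rotationByte : Int) (translation : List Int) (out : List Int) : Prop := out = fixMagicalVoxelBug_alt rotationByte translation
instance (rotationByte : Int) (translation : List Int) (out : List Int) : Decidable (Spec_fixMagicalVoxelBug rotationByte translation out) := by unfold Spec_fixMagicalVoxelBug; infer_instance

-- ===== CLAIM (what is proved, stated in full; the proofs are below) =====
def Claim_equal_fixMagicalVoxelBug : Prop := ∀ (rotationByte : Int) (translation : List Int), Dom_fixMagicalVoxelBug rotationByte translation → Pre_fixMagicalVoxelBug rotationByte translation → Spec_fixMagicalVoxelBug rotationByte translation (fixMagicalVoxelBug rotationByte translation)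

-- ===== LEMMAS AND PROOFS =====
theorem pvScanA_skip (b : Int) (t : List Int) (l : List (Int × List Int))
    (h : ∀ p ∈ l, b ≠ p.1) : pvScanA b t l = t := by
  induction l with
  | nil => rfl
  | cons p rest ih =>
    obtain ⟨k, adj⟩ := p
    simp only [pvScanA]
    rw [if_neg (h (k, adj) (List.mem_cons_self))]
    exact ih (fun q hq => h q (List.mem_cons_of_mem _ hq))

-- ===== VERDICT (by name: the statement is the Claim_ definition above) =====
theorem fixMagicalVoxelBug_spec : Claim_equal_fixMagicalVoxelBug := by
  intro b t _ _
  unfold Spec_fixMagicalVoxelBug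
  by_cases hb : b ∈ ([1,2,4,6,8,9,17,18,20,22,24,25,33,34,36,38,40,41,49,50,52,54,56,57,
                     65,66,68,70,72,73,81,82,84,86,88,89,97,98,100,102,104,105,113,114,116,118,120,121] : List Int)
  · simp only [List.mem_cons, List.not_mem_nil, or_false] at hb
    rcases hb with rfl|rfl|rfl|rfl|rfl|rfl|rfl|rfl|rfl|rfl|rfl|rfl|rfl|rfl|rfl|rfl|rfl|rfl|rfl|rfl|rfl|rfl|rfl|rfl|rfl|rfl|rfl|rfl|rfl|rfl|rfl|rfl|rfl|rfl|rfl|rfl|rfl|rfl|rfl|rfl|rfl|rfl|rfl|rfl|rfl|rfl|rfl|rfl <;>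
      simp [fixMagicalVoxelBug, fixMagicalVoxelBug_alt, pvScanA, pvRotationAdjustments,
            addToVectorA, PySem.Int.mod, PySem.Int.floordiv, PySem.List.pyGetD, PySem.List.pyGet?] <;> decide
  · simp only [List.mem_cons, List.not_mem_nil, or_false, not_or] at hb
    rw [fixMagicalVoxelBug, pvScanA_skip b t _ (by
      intro p hp
      fin_cases hp <;> simp_all)]
    rw [fixMagicalVoxelBug_alt, if_neg]
    rintro ⟨h0, h1, h2⟩
    rw [PySem.Int.mod_eq_emod_of_pos (by norm_num)] at h2
    omega
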